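-- pv_equiv track=rewrite | github.com/david-seu/CCC-oct-2023 | roar.py | find_farthest_points
-- ===== SOURCE A (Python) =====
-- def find_farthest_points(grid):
--     max_row, max_col = len(grid), len(grid[0])
--     max_distance_north, farthest_north = 0, (0, 0)
--     max_distance_south, farthest_south = 0, (0, 0)
--     max_distance_east, farthest_east = 0, (0, 0)
--     max_distance_west, farthest_west = 0, (0, 0)
--
--     for row in range(max_row):
--         for col in range(max_col):
--             if grid[row][col]:
--                 distance_north = row
--                 distance_south = max_row - 1 - row
--                 distance_east = max_col - 1 - col
--                 distance_west = col
--
--                 if distance_north > max_distance_north: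
--                     max_distance_north = distance_north
--                     farthest_north = (row, col)
--
--                 if distance_south > max_distance_south:
--                     max_distance_south = distance_south
--                     farthest_south = (row, col)
--
--                 if distance_east > max_distance_east:
--                     max_distance_east = distance_east
--                     farthest_east = (row, col)
--
--                 if distance_west > max_distance_west:
--                     max_distance_west = distance_west
--                     farthest_west = (row, col)
--     points = [farthest_north, farthest_south, farthest_east, farthest_west]
--     return points
-- ===== SOURCE B (Python) =====
-- def find_farthest_points(grid):
--     nrows, ncols = len(grid), len(grid[0])
--     cells = [(r, c) for r, row in enumerate(grid) for c in range(ncols) if row[c]]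
--
--     def pick(dist):
--         if not cells:
--             return (0, 0)
--         best = max(cells, key=dist)
--         return best if dist(best) > 0 else (0, 0)
--
--     north = pick(lambda p: p[0])
--     south = pick(lambda p: nrows - 1 - p[0])
--     east = pick(lambda p: ncols - 1 - p[1])
--     west = pick(lambda p: p[1])
--     return [north, south, east, west]
-- ===== Notes on version B (the rewrite author's own statement) =====
-- stated objective: simpler
-- what changed: Replaces the single 8-variable running-maximum sweep by collecting all truthy cells once and computing each direction independently as a first-maximal max() over that list (kept only when its distance is positive).
import Mathlib
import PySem

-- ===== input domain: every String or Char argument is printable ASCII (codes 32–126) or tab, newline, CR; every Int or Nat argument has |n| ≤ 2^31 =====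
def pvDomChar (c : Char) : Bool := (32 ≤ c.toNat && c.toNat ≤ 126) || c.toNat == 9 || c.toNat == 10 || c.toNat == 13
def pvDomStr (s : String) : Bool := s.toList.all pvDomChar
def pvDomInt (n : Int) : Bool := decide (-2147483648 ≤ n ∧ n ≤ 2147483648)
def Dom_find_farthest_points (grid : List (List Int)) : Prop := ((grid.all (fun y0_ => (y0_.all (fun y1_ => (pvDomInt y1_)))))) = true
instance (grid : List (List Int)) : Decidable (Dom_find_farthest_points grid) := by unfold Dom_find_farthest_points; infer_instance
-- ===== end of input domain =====

-- B collects the truthy cells once and takes an independent first-maximal max per direction,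
-- instead of A's single sweep carrying eight running variables (objective: simpler).

-- ===== PORT A =====
-- the four "if distance > max_distance" update blocks of A, one helper each
def pvUpdN (p : Int × (Int × Int)) (rc : Int × Int) : Int × (Int × Int) :=
  let d := rc.1
  if d > p.1 then (d, rc) else p

def pvUpdS (max_row : Int) (p : Int × (Int × Int)) (rc : Int × Int) : Int × (Int × Int) :=
  let d := max_row - 1 - rc.1
  if d > p.1 then (d, rc) else p

def pvUpdE (max_col : Int) (p : Int × (Int × Int)) (rc : Int × Int) : Int × (Int × Int) :=
  let d := max_col - 1 - rc.2
  if d > p.1 then (d, rc) else p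

def pvUpdW (p : Int × (Int × Int)) (rc : Int × Int) : Int × (Int × Int) :=
  let d := rc.2
  if d > p.1 then (d, rc) else p

def find_farthest_points (grid : List (List Int)) : List (Int × Int) :=
  let max_row := PySem.List.len grid
  let max_col := PySem.List.len (PySem.List.pyGetD grid 0 [])
  let s :=
    (PySem.List.pyRange 0 max_row 1).foldl (fun s row =>
      (PySem.List.pyRange 0 max_col 1).foldl (fun s col =>
        if PySem.List.pyGetD (PySem.List.pyGetD grid row []) col 0 ≠ 0 then
          (pvUpdN s.1 (row, col), pvUpdS max_row s.2.1 (row, col),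
           pvUpdE max_col s.2.2.1 (row, col), pvUpdW s.2.2.2 (row, col))
        else s) s)
      ((0, (0, 0)), (0, (0, 0)), (0, (0, 0)), (0, (0, 0)))
  [s.1.2, s.2.1.2, s.2.2.1.2, s.2.2.2.2]

-- ===== PORT B =====
-- [(r, c) for r, row in enumerate(grid) for c in range(ncols) if row[c]]
def pvCells (grid : List (List Int)) (ncols : Int) : List (Int × Int) :=
  (PySem.List.enumerate grid).flatMap (fun p =>
    ((PySem.List.pyRange 0 ncols 1).filter
        (fun c => decide (PySem.List.pyGetD p.2 c 0 ≠ 0))).map (fun c => (p.1, c)))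

-- pick(dist): (0,0) on no cells, else first-maximal max kept only for positive distance
def pvPick (cells : List (Int × Int)) (dist : Int × Int → Int) : Int × Int :=
  match PySem.List.max? cells dist with
  | none => (0, 0)
  | some best => if dist best > 0 then best else (0, 0)

def find_farthest_points_alt (grid : List (List Int)) : List (Int × Int) :=
  let nrows := PySem.List.len grid
  let ncols := PySem.List.len (PySem.List.pyGetD grid 0 [])
  let cells := pvCells grid ncols
  [pvPick cells (fun p => p.1),
   pvPick cells (fun p => nrows - 1 - p.1),
   pvPick cells (fun p => ncols - 1 - p.2),
   pvPick cells (fun p => p.2)]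

-- ===== PRECONDITION & SPEC =====
-- Pre_ excludes exactly the inputs where Python A raises IndexError: the empty grid (grid[0])
-- and grids with a row shorter than the first row (grid[row][col] for col < len(grid[0])).
def Pre_find_farthest_points (grid : List (List Int)) : Prop :=
  grid ≠ [] ∧ ∀ row ∈ grid, grid.headI.length ≤ row.length
instance (grid : List (List Int)) : Decidable (Pre_find_farthest_points grid) := by
  unfold Pre_find_farthest_points; infer_instance

def pvWitness_find_farthest_points : List (List Int) := [[0, 1], [1, 0]]

def Spec_find_farthest_points (grid : List (List Int)) (out : List (Int × Int)) : Prop := out = find_farthest_points_alt grid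
instance (grid : List (List Int)) (out : List (Int × Int)) : Decidable (Spec_find_farthest_points grid out) := by unfold Spec_find_farthest_points; infer_instance

-- ===== CLAIM (what is proved, stated in full; the proofs are below) =====
def Claim_equal_find_farthest_points : Prop := ∀ (grid : List (List Int)), Dom_find_farthest_points grid → Pre_find_farthest_points grid → Spec_find_farthest_points grid (find_farthest_points grid)

-- ===== LEMMAS AND PROOFS =====

-- canonical row-major list of truthy cells, by structural recursion on the rows
def pvCellsRec (ncols : Int) : List (List Int) → Int → List (Int × Int)
  | [], _ => []
  | row :: rest, r =>
      (((PySem.List.pyRange 0 ncols 1).filter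
          (fun c => decide (PySem.List.pyGetD row c 0 ≠ 0))).map (fun c => (r, c)))
        ++ pvCellsRec ncols rest (r + 1)

lemma pvCellsEnum (ncols : Int) :
    ∀ (rows : List (List Int)) (s : Int),
      (PySem.List.enumerate rows s).flatMap (fun p =>
        ((PySem.List.pyRange 0 ncols 1).filter
            (fun c => decide (PySem.List.pyGetD p.2 c 0 ≠ 0))).map (fun c => (p.1, c)))
      = pvCellsRec ncols rows s := by
  intro rows
  induction rows with
  | nil => intro s; simp [PySem.List.enumerate, pvCellsRec]
  | cons row rest ih =>
      intro s
      simp only [PySem.List.enumerate, List.flatMap_cons, pvCellsRec]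
      rw [ih (s + 1)]

lemma pvRowsFold {S : Type} (grid : List (List Int)) (ncols : Int) (u : S → (Int × Int) → S) :
    ∀ (rest pre : List (List Int)), grid = pre ++ rest → ∀ (init : S),
      (PySem.List.pyRange (pre.length : Int) (grid.length : Int) 1).foldl
        (fun s r => (PySem.List.pyRange 0 ncols 1).foldl
          (fun s c => if PySem.List.pyGetD (PySem.List.pyGetD grid r []) c 0 ≠ 0 then u s (r, c) else s) s) init
      = (pvCellsRec ncols rest (pre.length : Int)).foldl u init := by
  intro rest
  induction rest with
  | nil =>
      intro pre hg init
      subst hg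
      simp [pvCellsRec, PySem.List.pyRange]
  | cons row rest ih =>
      intro pre hg init
      have hlt : (pre.length : Int) < (grid.length : Int) := by
        subst hg; simp
      have hrow : PySem.List.pyGetD grid (pre.length : Int) [] = row := by
        subst hg
        simp [PySem.List.pyGetD]
      rw [PySem.List.pyRange_one_cons hlt, List.foldl_cons]
      have hinner : ∀ (s0 : S),
          (PySem.List.pyRange 0 ncols 1).foldl
            (fun s c => if PySem.List.pyGetD (PySem.List.pyGetD grid (pre.length : Int) []) c 0 ≠ 0
              then u s ((pre.length : Int), c) else s) s0
          = (((PySem.List.pyRange 0 ncols 1).filter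
                (fun c => decide (PySem.List.pyGetD row c 0 ≠ 0))).map
              (fun c => ((pre.length : Int), c))).foldl u s0 := by
        intro s0
        rw [List.foldl_map, List.foldl_filter, hrow]
        simp
      rw [hinner init]
      have hg' : grid = (pre ++ [row]) ++ rest := by simp [hg]
      have := ih (pre ++ [row]) hg'
        ((((PySem.List.pyRange 0 ncols 1).filter
            (fun c => decide (PySem.List.pyGetD row c 0 ≠ 0))).map
          (fun c => ((pre.length : Int), c))).foldl u init)
      simp only [List.length_append, List.length_cons, List.length_nil, Nat.cast_add,
        Nat.cast_one, zero_add] at this ⊢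
      rw [pvCellsRec, List.foldl_append]
      exact this

-- max? over (x :: L) is the running first-maximal fold started at x
def pvBest {α : Type} (key : α → Int) (L : List α) (x : α) : α :=
  L.foldl (fun m y => if key m < key y then y else m) x

lemma pvFoldSome {α : Type} (key : α → Int) :
    ∀ (L : List α) (x : α),
      List.foldl (fun acc y => match acc with
        | none => some y
        | some m => if key m < key y then some y else some m) (some x) L = some (pvBest key L x) := by
  intro L
  induction L with
  | nil => intro x; simp [pvBest]
  | cons y L ih =>
      intro x
      simp only [List.foldl, pvBest] at *
      by_cases h : key x < key y <;> simp [h, ih]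

lemma pvMax?_cons {α : Type} (key : α → Int) (L : List α) (x : α) :
    PySem.List.max? (x :: L) key = some (pvBest key L x) := by
  simp only [PySem.List.max?, List.foldl]
  exact pvFoldSome key L x

lemma pvLe_best {α : Type} (key : α → Int) :
    ∀ (L : List α) (x : α), key x ≤ key (pvBest key L x) := by
  intro L
  induction L with
  | nil => intro x; simp [pvBest]
  | cons y L ih =>
      intro x
      simp only [pvBest, List.foldl]
      by_cases h : key x < key y
      · simp only [if_pos h]
        exact le_trans (le_of_lt h) (ih y)
      · simp only [if_neg h]
        exact ih x

lemma pvBest_eq {α : Type} (key : α → Int) :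
    ∀ (L : List α) (x : α),
      pvBest key L x = match PySem.List.max? L key with
        | none => x
        | some m => if key x < key m then m else x := by
  intro L
  induction L with
  | nil => intro x; simp [pvBest, PySem.List.max?]
  | cons y L ih =>
      intro x
      rw [pvMax?_cons]
      show pvBest key (y :: L) x = if key x < key (pvBest key L y) then pvBest key L y else x
      have hL : pvBest key (y :: L) x = pvBest key L (if key x < key y then y else x) := by
        simp only [pvBest, List.foldl]
      rw [hL]
      by_cases h : key x < key y
      · rw [if_pos h]
        have h2 : key x < key (pvBest key L y) := lt_of_lt_of_le h (pvLe_best key L y)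
        rw [if_pos h2]
      · rw [if_neg h, ih x]
        cases hM : PySem.List.max? L key with
        | none =>
            have hnil : L = [] := (PySem.List.max?_eq_none_iff L key).1 hM
            subst hnil
            simp only [pvBest, List.foldl]
            rw [if_neg h]
        | some m =>
            have hby : pvBest key L y = if key y < key m then m else y := by
              rw [ih y, hM]
            rw [hby]
            simp only []
            by_cases h2 : key y < key m
            · rw [if_pos h2]
            · rw [if_neg h2, if_neg h, if_neg (show ¬ key x < key m by omega)]

lemma pvFoldAux (dist : Int × Int → Int) :
    ∀ (L : List (Int × Int)) (md : Int) (f : Int × Int),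
      (L.foldl (fun p q => if p.1 < dist q then (dist q, q) else p) (md, f)).2
      = match PySem.List.max? L dist with
        | none => f
        | some m => if md < dist m then m else f := by
  intro L
  induction L with
  | nil => intro md f; simp [PySem.List.max?]
  | cons x L ih =>
      intro md f
      rw [pvMax?_cons]
      show (List.foldl (fun p q => if p.1 < dist q then (dist q, q) else p)
            (if md < dist x then (dist x, x) else (md, f)) L).2
          = if md < dist (pvBest dist L x) then pvBest dist L x else f
      by_cases h : md < dist x
      · rw [if_pos h, ih (dist x) x]
        have h2 : md < dist (pvBest dist L x) := lt_of_lt_of_le h (pvLe_best dist L x)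
        rw [if_pos h2, pvBest_eq dist L x]
        cases PySem.List.max? L dist <;> rfl
      · rw [if_neg h, ih md f, pvBest_eq dist L x]
        cases PySem.List.max? L dist with
        | none =>
            show f = if md < dist x then x else f
            rw [if_neg h]
        | some m =>
            show (if md < dist m then m else f)
              = if md < dist (if dist x < dist m then m else x)
                then (if dist x < dist m then m else x) else f
            by_cases h2 : dist x < dist m
            · rw [if_pos h2]
            · rw [if_neg h2, if_neg h, if_neg (show ¬ md < dist m by omega)]

lemma pvFoldPick (dist : Int × Int → Int) (L : List (Int × Int)) :
    (L.foldl (fun p q => if p.1 < dist q then (dist q, q) else p) (0, (0, 0))).2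
      = pvPick L dist := by
  rw [pvFoldAux dist L 0 (0, 0)]
  unfold pvPick
  cases PySem.List.max? L dist <;> rfl

-- A's single fold over a 4-component state splits into four independent folds
lemma pvFoldl_prod4 {β σ₁ σ₂ σ₃ σ₄ : Type}
    (f1 : σ₁ → β → σ₁) (f2 : σ₂ → β → σ₂) (f3 : σ₃ → β → σ₃) (f4 : σ₄ → β → σ₄) :
    ∀ (l : List β) (a : σ₁) (b : σ₂) (c : σ₃) (d : σ₄),
      l.foldl (fun s e => (f1 s.1 e, f2 s.2.1 e, f3 s.2.2.1 e, f4 s.2.2.2 e)) (a, b, c, d)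
        = (l.foldl f1 a, l.foldl f2 b, l.foldl f3 c, l.foldl f4 d) := by
  intro l
  induction l with
  | nil => intro a b c d; rfl
  | cons x t ih =>
      intro a b c d
      simp only [List.foldl_cons]
      exact ih (f1 a x) (f2 b x) (f3 c x) (f4 d x)

-- ===== VERDICT (by name: the statement is the Claim_ definition above) =====
theorem find_farthest_points_spec : Claim_equal_find_farthest_points := by
  unfold Claim_equal_find_farthest_points
  intro grid _ _
  unfold Spec_find_farthest_points
  have hrows := pvRowsFold grid (PySem.List.len (PySem.List.pyGetD grid 0 []))
    (fun s (q : Int × Int) =>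
      (pvUpdN s.1 q, pvUpdS (PySem.List.len grid) s.2.1 q,
       pvUpdE (PySem.List.len (PySem.List.pyGetD grid 0 [])) s.2.2.1 q, pvUpdW s.2.2.2 q))
    grid [] rfl (((0, (0, 0)), (0, (0, 0)), (0, (0, 0)), (0, (0, 0))))
  simp only [List.length_nil, Nat.cast_zero] at hrows
  have hprod := pvFoldl_prod4 pvUpdN (pvUpdS (PySem.List.len grid))
    (pvUpdE (PySem.List.len (PySem.List.pyGetD grid 0 []))) pvUpdW
    (pvCellsRec (PySem.List.len (PySem.List.pyGetD grid 0 [])) grid 0)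
    (0, (0, 0)) (0, (0, 0)) (0, (0, 0)) (0, (0, 0))
  have hA : find_farthest_points grid
      = [((pvCellsRec (PySem.List.len (PySem.List.pyGetD grid 0 [])) grid 0).foldl pvUpdN (0, (0, 0))).2,
         ((pvCellsRec (PySem.List.len (PySem.List.pyGetD grid 0 [])) grid 0).foldl
            (pvUpdS (PySem.List.len grid)) (0, (0, 0))).2,
         ((pvCellsRec (PySem.List.len (PySem.List.pyGetD grid 0 [])) grid 0).foldl
            (pvUpdE (PySem.List.len (PySem.List.pyGetD grid 0 []))) (0, (0, 0))).2,
         ((pvCellsRec (PySem.List.len (PySem.List.pyGetD grid 0 [])) grid 0).foldl pvUpdW (0, (0, 0))).2] :=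
    congrArg (fun (s : (Int × (Int × Int)) × (Int × (Int × Int)) × (Int × (Int × Int)) × (Int × (Int × Int))) => [s.1.2, s.2.1.2, s.2.2.1.2, s.2.2.2.2]) (Eq.trans hrows hprod)
  have hB : find_farthest_points_alt grid
      = [pvPick (pvCellsRec (PySem.List.len (PySem.List.pyGetD grid 0 [])) grid 0) (fun p => p.1),
         pvPick (pvCellsRec (PySem.List.len (PySem.List.pyGetD grid 0 [])) grid 0)
           (fun p => PySem.List.len grid - 1 - p.1),
         pvPick (pvCellsRec (PySem.List.len (PySem.List.pyGetD grid 0 [])) grid 0)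
           (fun p => PySem.List.len (PySem.List.pyGetD grid 0 []) - 1 - p.2),
         pvPick (pvCellsRec (PySem.List.len (PySem.List.pyGetD grid 0 [])) grid 0) (fun p => p.2)] :=
    congrArg (fun L => [pvPick L (fun p => p.1),
        pvPick L (fun p => PySem.List.len grid - 1 - p.1),
        pvPick L (fun p => PySem.List.len (PySem.List.pyGetD grid 0 []) - 1 - p.2),
        pvPick L (fun p => p.2)])
      (pvCellsEnum (PySem.List.len (PySem.List.pyGetD grid 0 [])) grid 0)
  rw [hA, hB]
  rw [show ((pvCellsRec (PySem.List.len (PySem.List.pyGetD grid 0 [])) grid 0).foldl pvUpdN (0, (0, 0))).2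
        = pvPick (pvCellsRec (PySem.List.len (PySem.List.pyGetD grid 0 [])) grid 0) (fun p => p.1)
      from pvFoldPick (fun p => p.1) _]
  rw [show ((pvCellsRec (PySem.List.len (PySem.List.pyGetD grid 0 [])) grid 0).foldl
          (pvUpdS (PySem.List.len grid)) (0, (0, 0))).2
        = pvPick (pvCellsRec (PySem.List.len (PySem.List.pyGetD grid 0 [])) grid 0)
            (fun p => PySem.List.len grid - 1 - p.1)
      from pvFoldPick (fun p => PySem.List.len grid - 1 - p.1) _]
  rw [show ((pvCellsRec (PySem.List.len (PySem.List.pyGetD grid 0 [])) grid 0).foldl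
          (pvUpdE (PySem.List.len (PySem.List.pyGetD grid 0 []))) (0, (0, 0))).2
        = pvPick (pvCellsRec (PySem.List.len (PySem.List.pyGetD grid 0 [])) grid 0)
            (fun p => PySem.List.len (PySem.List.pyGetD grid 0 []) - 1 - p.2)
      from pvFoldPick (fun p => PySem.List.len (PySem.List.pyGetD grid 0 []) - 1 - p.2) _]
  rw [show ((pvCellsRec (PySem.List.len (PySem.List.pyGetD grid 0 [])) grid 0).foldl pvUpdW (0, (0, 0))).2
        = pvPick (pvCellsRec (PySem.List.len (PySem.List.pyGetD grid 0 [])) grid 0) (fun p => p.2)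
      from pvFoldPick (fun p => p.2) _]
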